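-- pv_equiv track=rewrite | github.com/MrDvD/itmo_labs | computer science/1/test_preparation/factorial.py | to_factorial
-- ===== SOURCE A (Python) =====
-- def map_number(x):
--    return str(x) if x < 10 else chr(ord('A') + x - 10)
--
-- def to_factorial(x):
--    if not x:
--       return '0'
--    result, curr_div = '', 2
--    while x > 0:
--       result += map_number(x % curr_div)
--       x //= curr_div
--       curr_div += 1
--    return result[::-1]
-- ===== SOURCE B (Python) =====
-- def map_number(x):
--    return str(x) if x < 10 else chr(ord('A') + x - 10)
--
-- def to_factorial(x):
--    if not x:
--       return '0'
--    # factorial table 1!, 2!, ..., n! with n! <= x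
--    facts = []
--    f, k = 1, 1
--    while f <= x:
--       facts.append(f)
--       k += 1
--       f *= k
--    # extract digits most-significant first: no final reversal needed
--    digits = []
--    for f in reversed(facts):
--       d, x = divmod(x, f)
--       digits.append(map_number(d))
--    return ''.join(digits)
-- ===== Notes on version B (the rewrite author's own statement) =====
-- stated objective: alternative
-- what changed: Replaces A's ascending remainder chain (repeated mod/floor-divide by a growing divisor, collecting digits least-significant first and reversing the string at the end) by first building the ascending factorial table up to the largest factorial not exceeding x and then extracting digits most-significant first by top-down divmod against the reversed table, so no final reversal is needed.
import Mathlib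
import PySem

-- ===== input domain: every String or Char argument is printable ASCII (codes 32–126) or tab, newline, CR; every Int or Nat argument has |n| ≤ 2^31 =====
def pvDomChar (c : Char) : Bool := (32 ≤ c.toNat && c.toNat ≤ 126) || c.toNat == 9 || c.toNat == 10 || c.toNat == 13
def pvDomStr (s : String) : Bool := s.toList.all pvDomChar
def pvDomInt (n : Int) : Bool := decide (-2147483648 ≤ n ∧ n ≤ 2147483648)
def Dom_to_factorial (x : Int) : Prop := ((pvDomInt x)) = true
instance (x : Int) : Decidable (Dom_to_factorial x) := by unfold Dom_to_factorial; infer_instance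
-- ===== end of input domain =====

-- B replaces A's ascending remainder chain (LSB-first digits + final reversal) by a
-- factorial table walked top-down with divmod, emitting digits MSB-first (objective: alternative).


-- termination helper for the two while loops (cited by the ports' decreasing_by)
theorem pvEdivLtSelf (a b : Int) (h : 0 < a) (h2 : 1 < b) : a / b < a := by
  apply Int.ediv_lt_of_lt_mul (by omega); nlinarith

-- ===== PORT A =====
-- shared helper of Source A and Source B; str(x) → PySem.Int.toStr, chr(ord('A')+x-10) → Char.ofNat
-- (exact for the in-range code points Python's chr accepts; both programs only call it with 0 ≤ x)
def map_number (x : Int) : String :=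
  if x < 10 then PySem.Int.toStr x
  else String.singleton (Char.ofNat (65 + x - 10).toNat)

-- the while loop of A; the growing str 'result' is carried as List Char (the PySem carrier
-- for Python str).  The '2 ≤ curr' conjunct is a totality guard only: A always calls the
-- loop with curr = 2 and curr only grows.
def aLoop (x curr : Int) (result : List Char) : List Char :=
  if h : 0 < x ∧ 2 ≤ curr then
    aLoop (PySem.Int.floordiv x curr) (curr + 1)
          (result ++ (map_number (PySem.Int.mod x curr)).toList)
  else result
termination_by x.toNat
decreasing_by
  have h1 : PySem.Int.floordiv x curr = x / curr := PySem.Int.floordiv_eq_ediv_of_pos (by omega)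
  have h2 : x / curr < x := pvEdivLtSelf x curr (by omega) (by omega)
  have h3 : 0 ≤ x / curr := Int.ediv_nonneg (by omega) (by omega)
  simp [h1]; omega

def to_factorial (x : Int) : String :=
  if x == 0 then "0"
  else String.ofList (aLoop x 2 []).reverse   -- result[::-1] (cf. PySem.Str.slice?_none_none_neg_one)

-- ===== PORT B =====
-- the first while loop of Source B: facts = [1!, 2!, ..., n!] with n! ≤ x.
-- '1 ≤ f ∧ 1 ≤ k' is a totality guard only: the loop starts at f = k = 1 and both only grow.
def bFacts (x f k : Int) (facts : List Int) : List Int :=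
  if h : f ≤ x ∧ 1 ≤ f ∧ 1 ≤ k then
    bFacts x (f * (k + 1)) (k + 1) (facts ++ [f])
  else facts
termination_by (x + 1 - f).toNat
decreasing_by
  have : f + 1 ≤ f * (k + 1) := by nlinarith [h.2.1, h.2.2]
  have := h.1
  omega

-- the for loop of Source B over reversed(facts); divmod(x, f) = (x // f, x % f) for f ≠ 0
def bLoop (x : Int) (fs : List Int) (digits : List (List Char)) : List (List Char) :=
  match fs with
  | [] => digits
  | f :: rest =>
      bLoop (PySem.Int.mod x f) rest
            (digits ++ [(map_number (PySem.Int.floordiv x f)).toList])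

def to_factorial_alt (x : Int) : String :=
  if x == 0 then "0"
  else String.ofList (PySem.Chars.join [] (bLoop x (bFacts x 1 1 []).reverse []))

-- ===== PRECONDITION & SPEC =====
def Spec_to_factorial (x : Int) (out : String) : Prop := out = to_factorial_alt x
instance (x : Int) (out : String) : Decidable (Spec_to_factorial x out) := by unfold Spec_to_factorial; infer_instance

-- ===== CLAIM (what is proved, stated in full; the proofs are below) =====
def Claim_equal_to_factorial : Prop := ∀ (x : Int), Dom_to_factorial x → Spec_to_factorial x (to_factorial x)

-- ===== LEMMAS AND PROOFS =====

-- integer factorial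
def ifact (n : Nat) : Int := (Nat.factorial n : Int)

-- A's digit stream, least-significant first, in pure ediv/emod
def adig (x d : Int) : List Int :=
  if h : 0 < x ∧ 2 ≤ d then (x % d) :: adig (x / d) (d + 1) else []
termination_by x.toNat
decreasing_by
  have h2 : x / d < x := pvEdivLtSelf x d (by omega) (by omega)
  have h3 : 0 ≤ x / d := Int.ediv_nonneg (by omega) (by omega)
  omega

-- B's digit stream over a (descending) divisor list, in pure ediv/emod
def bdig (x : Int) (fs : List Int) : List Int :=
  match fs with
  | [] => []
  | f :: rest => (x / f) :: bdig (x % f) rest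

-- descending factorial table [k!, (k-1)!, ..., 1!]
def descfacts : Nat → List Int
  | 0 => []
  | k + 1 => ifact (k + 1) :: descfacts k

-- generalized rising product d·(d+1)···(d+k-1) and digit formula
def gprod (d : Int) : Nat → Int
  | 0 => 1
  | k + 1 => d * gprod (d + 1) k

def gdig (d x : Int) (j : Nat) : Int := (x / gprod d j) % (d + (j : Int))

-- the char a digit maps to
def mchar (v : Int) : Char :=
  if v < 10 then Char.ofNat (48 + v.toNat) else Char.ofNat (65 + v - 10).toNat

theorem map_number_toList (v : Int) (hv : 0 ≤ v) : (map_number v).toList = [mchar v] := by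
  unfold map_number mchar
  by_cases h : v < 10
  · rw [if_pos h, if_pos h, PySem.Int.toList_toStr]
    interval_cases v <;> decide
  · rw [if_neg h, if_neg h]
    simp

theorem gprod_succ_right (k : Nat) : ∀ d : Int, gprod d (k + 1) = gprod d k * (d + k) := by
  induction k with
  | zero => intro d; simp [gprod]
  | succ k ih =>
    intro d
    show d * gprod (d + 1) (k + 1) = d * gprod (d + 1) k * (d + ↑(k + 1))
    rw [ih (d + 1)]; push_cast; ring

theorem gprod_pos (k : Nat) : ∀ d : Int, 1 ≤ d → 0 < gprod d k := by
  induction k with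
  | zero => intro d _; simp [gprod]
  | succ k ih =>
    intro d hd
    have := ih (d + 1) (by omega)
    show 0 < d * gprod (d + 1) k
    positivity

theorem ifact_pos (n : Nat) : 0 < ifact n := by
  unfold ifact; exact_mod_cast Nat.factorial_pos n

theorem ifact_le {m n : Nat} (h : m ≤ n) : ifact m ≤ ifact n := by
  unfold ifact; exact_mod_cast Nat.factorial_le h

theorem ifact_succ (n : Nat) : ifact (n + 1) = ifact n * (n + 1) := by
  unfold ifact; rw [Nat.factorial_succ]; push_cast; ring

theorem gprod_two (k : Nat) : gprod 2 k = ifact (k + 1) := by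
  induction k with
  | zero => simp [gprod, ifact, Nat.factorial]
  | succ k ih =>
    rw [gprod_succ_right, ih, show ifact (k + 1 + 1) = ifact (k + 1) * (↑(k + 1) + 1) from ifact_succ (k + 1)]
    push_cast; ring

theorem adig_nonneg (x d : Int) : ∀ v ∈ adig x d, 0 ≤ v := by
  fun_induction adig x d with
  | case1 x d h ih =>
    intro v hv
    rcases List.mem_cons.1 hv with rfl | hv
    · exact Int.emod_nonneg x (by omega)
    · exact ih v hv
  | case2 x d h => simp

theorem bdig_nonneg (fs : List Int) : ∀ x : Int, 0 ≤ x → (∀ f ∈ fs, 0 < f) →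
    ∀ v ∈ bdig x fs, 0 ≤ v := by
  induction fs with
  | nil => intro x _ _ v hv; simp [bdig] at hv
  | cons f rest ih =>
    intro x hx hfs v hv
    have hf : 0 < f := hfs f (by simp)
    rcases List.mem_cons.1 hv with rfl | hv
    · exact Int.ediv_nonneg hx (by omega)
    · exact ih (x % f) (Int.emod_nonneg x (by omega)) (fun g hg => hfs g (by simp [hg])) v hv

theorem aLoop_eq (x curr : Int) (res : List Char) :
    aLoop x curr res = res ++ ((adig x curr).map (fun v => (map_number v).toList)).flatten := by
  fun_induction aLoop x curr res with
  | case1 x curr res h ih =>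
    conv_rhs => rw [adig.eq_def, dif_pos h]
    rw [ih, PySem.Int.floordiv_eq_ediv_of_pos (show (0:Int) < curr by omega),
        PySem.Int.mod_eq_emod_of_pos (show (0:Int) < curr by omega)]
    simp
  | case2 x curr res h => rw [adig.eq_def, dif_neg h]; simp

theorem bLoop_eq (fs : List Int) : ∀ (x : Int) (ds : List (List Char)), (∀ f ∈ fs, 0 < f) →
    bLoop x fs ds = ds ++ (bdig x fs).map (fun v => (map_number v).toList) := by
  induction fs with
  | nil => intro x ds _; simp [bLoop, bdig]
  | cons f rest ih =>
    intro x ds hfs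
    have hf : 0 < f := hfs f (by simp)
    rw [bLoop, ih (PySem.Int.mod x f) _ (fun g hg => hfs g (by simp [hg])),
        PySem.Int.floordiv_eq_ediv_of_pos hf, PySem.Int.mod_eq_emod_of_pos hf]
    show _ = ds ++ ((x / f) :: bdig (x % f) rest).map _
    simp

-- A's digit stream, zero-padded to length k, is the positional digit formula
theorem adig_pad (k : Nat) : ∀ (x d : Int), 0 ≤ x → 2 ≤ d → x < gprod d k →
    adig x d ++ List.replicate (k - (adig x d).length) 0 = (List.range k).map (gdig d x) := by
  induction k with
  | zero =>
    intro x d hx hd hlt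
    have hx0 : x = 0 := by simp [gprod] at hlt; omega
    subst hx0
    rw [adig.eq_def, dif_neg (by omega)]
    simp
  | succ k ih =>
    intro x d hx hd hlt
    by_cases hx0 : 0 < x
    · rw [adig.eq_def, dif_pos ⟨hx0, hd⟩]
      have hgp : 0 < gprod (d + 1) k := gprod_pos k (d + 1) (by omega)
      have hxd0 : 0 ≤ x / d := Int.ediv_nonneg hx (by omega)
      have hxd1 : x / d < gprod (d + 1) k := by
        rw [Int.ediv_lt_iff_lt_mul (by omega : (0:Int) < d)]
        calc x < gprod d (k + 1) := hlt
        _ = gprod (d + 1) k * d := by rw [show gprod d (k + 1) = d * gprod (d + 1) k from rfl]; ring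
      have tail := ih (x / d) (d + 1) hxd0 (by omega) hxd1
      rw [List.range_succ_eq_map]
      simp only [List.map_cons, List.map_map]
      have h0 : gdig d x 0 = x % d := by
        simp [gdig, gprod]
      have hsucc : (List.range k).map (gdig d x ∘ Nat.succ) = (List.range k).map (gdig (d + 1) (x / d)) := by
        refine List.map_congr_left (fun j _ => ?_)
        show gdig d x (j + 1) = gdig (d + 1) (x / d) j
        unfold gdig
        rw [show gprod d (j + 1) = d * gprod (d + 1) j from rfl,
            ← Int.ediv_ediv_of_nonneg (by omega : (0:Int) ≤ d),
            show d + ↑(j + 1) = (d + 1) + ↑j by push_cast; ring]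
      rw [hsucc, ← tail, h0]
      simp only [List.cons_append, List.length_cons]
      congr 3
      omega
    · have hx0' : x = 0 := by omega
      subst hx0'
      rw [adig.eq_def, dif_neg (by omega)]
      have : (List.range (k + 1)).map (gdig d 0) = (List.range (k + 1)).map (fun _ => (0:Int)) :=
        List.map_congr_left (fun j _ => by simp [gdig])
      rw [this]
      simp [List.map_const']

-- B's top-down digits over the descending factorial table reverse the digit formula
theorem bdig_descfacts (k : Nat) : ∀ x : Int, 0 ≤ x → x < ifact (k + 1) →
    bdig x (descfacts k) = ((List.range k).map (gdig 2 x)).reverse := by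
  induction k with
  | zero => intro x _ _; simp [descfacts, bdig]
  | succ k ih =>
    intro x hx hlt
    have hF : 0 < ifact (k + 1) := ifact_pos (k + 1)
    show (x / ifact (k + 1)) :: bdig (x % ifact (k + 1)) (descfacts k) = _
    rw [ih (x % ifact (k + 1)) (Int.emod_nonneg x (by omega)) (Int.emod_lt_of_pos x hF),
        List.range_succ]
    simp only [List.map_append, List.map_cons, List.map_nil, List.reverse_append,
      List.reverse_cons, List.reverse_nil, List.nil_append, List.cons_append]
    congr 1
    · -- head digit: gdig 2 x k = x / (k+1)!  since the quotient is already < k+2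
      rw [show gdig 2 x k = (x / gprod 2 k) % (2 + (k:Int)) from rfl, gprod_two]
      rw [Int.emod_eq_of_lt (Int.ediv_nonneg hx (by omega)) ?_]
      rw [Int.ediv_lt_iff_lt_mul hF]
      calc x < ifact (k + 2) := hlt
      _ = ifact (k + 1) * (↑(k + 1) + 1) := ifact_succ (k + 1)
      _ = (2 + ↑k) * ifact (k + 1) := by push_cast; ring
    · congr 1
      refine List.map_congr_left (fun j hj => ?_)
      have hjk : j < k := List.mem_range.1 hj
      -- gdig is insensitive to reduction mod a higher factorial
      obtain ⟨c, hc⟩ : (Nat.factorial (j + 2) : Int) ∣ ifact (k + 1) := by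
        unfold ifact
        exact_mod_cast Nat.factorial_dvd_factorial (by omega : j + 2 ≤ k + 1)
      have hGpos : 0 < ifact (j + 1) := ifact_pos (j + 1)
      have h2 : (Nat.factorial (j + 2) : Int) = ifact (j + 1) * (↑j + 2) := by
        have := ifact_succ (j + 1)
        unfold ifact at this ⊢
        push_cast at this ⊢
        linarith
      have hck : ifact (k + 1) = ifact (j + 1) * (↑j + 2) * c := by rw [hc, h2]
      have hxsplit : x = x % ifact (k + 1) + ifact (j + 1) * ((↑j + 2) * (c * (x / ifact (k + 1)))) := by
        have h1 : ifact (k + 1) * (x / ifact (k + 1)) + x % ifact (k + 1) = x :=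
          Int.mul_ediv_add_emod x _
        linear_combination (-1) * h1 + (x / ifact (k + 1)) * hck
      show gdig 2 (x % ifact (k + 1)) j = gdig 2 x j
      unfold gdig
      rw [gprod_two]
      conv_rhs => rw [hxsplit]
      rw [Int.add_mul_ediv_left _ _ (by omega : ifact (j + 1) ≠ 0),
          show (2:Int) + ↑j = (↑j + 2) by ring, Int.add_mul_emod_self_left]

theorem adig_len (n : Nat) (x : Int) (hn : 1 ≤ n) (h1 : ifact n ≤ x) (h2 : x < ifact (n + 1)) :
    (adig x 2).length = n := by
  have hx0 : (0:Int) ≤ x := le_trans (le_of_lt (ifact_pos n)) h1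
  have hpad := adig_pad n x 2 hx0 (by omega) (by rw [gprod_two]; exact h2)
  have hlen := congrArg List.length hpad
  simp only [List.length_append, List.length_replicate, List.length_map, List.length_range] at hlen
  by_contra hne
  have hLlt : (adig x 2).length < n := by omega
  obtain ⟨m, hm⟩ : ∃ m, m + 1 = n := ⟨n - 1, by omega⟩
  have h9 : m < (adig x 2 ++ List.replicate (n - (adig x 2).length) 0).length := by
    simp only [List.length_append, List.length_replicate]; omega
  have e1 := List.getElem_of_eq hpad h9
  rw [List.getElem_append_right (by omega : (adig x 2).length ≤ m), List.getElem_replicate] at e1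
  rw [List.getElem_map, List.getElem_range] at e1
  -- but the top digit x / n! is at least 1, contradiction
  have hq1 : 1 ≤ x / ifact n := by
    rw [Int.le_ediv_iff_mul_le (ifact_pos n)]; linarith
  have hq2 : x / ifact n < (n:Int) + 1 := by
    rw [Int.ediv_lt_iff_lt_mul (ifact_pos n)]
    calc x < ifact (n + 1) := h2
    _ = ifact n * (↑n + 1) := ifact_succ n
    _ = (↑n + 1) * ifact n := by ring
  have : gdig 2 x m = x / ifact n := by
    unfold gdig
    rw [gprod_two, hm, show (2:Int) + ↑m = ↑n + 1 by omega]
    exact Int.emod_eq_of_lt (by omega) hq2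
  omega

theorem bFacts_spec (x : Int) (n : Nat) (h1 : ifact n ≤ x) (h2 : x < ifact (n + 1)) :
    ∀ (m i : Nat) (acc : List Int), 1 ≤ i → i + m = n + 1 →
      bFacts x (ifact i) i acc = acc ++ (List.range m).map (fun t => ifact (i + t)) := by
  intro m
  induction m with
  | zero =>
    intro i acc hi him
    have hi' : i = n + 1 := by omega
    subst hi'
    rw [bFacts.eq_def, dif_neg (by push_neg; intro hle; omega)]
    simp
  | succ m ih =>
    intro i acc hi him
    have hin : i ≤ n := by omega
    have hle : ifact i ≤ x := le_trans (ifact_le hin) h1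
    have hfi : (1:Int) ≤ ifact i := ifact_pos i
    rw [bFacts.eq_def, dif_pos ⟨hle, hfi, by exact_mod_cast hi⟩]
    have hnext : ifact i * ((i:Int) + 1) = ifact (i + 1) := (ifact_succ i).symm
    have hcast : ((i:Int) + 1) = ((i + 1 : Nat) : Int) := by push_cast; ring
    rw [hcast] at hnext ⊢
    rw [hnext, ih (i + 1) (acc ++ [ifact i]) (by omega) (by omega)]
    rw [List.append_assoc, List.range_succ_eq_map]
    simp only [List.map_cons, List.map_map, List.singleton_append, Nat.add_zero]
    congr 1
    congr 1
    refine List.map_congr_left (fun t _ => ?_)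
    show ifact (i + 1 + t) = ifact (i + (t + 1))
    congr 1
    omega

theorem exists_interval (x : Int) (hx : 1 ≤ x) :
    ∃ n : Nat, 1 ≤ n ∧ ifact n ≤ x ∧ x < ifact (n + 1) := by
  have hex : ∃ m : Nat, x < ifact (m + 1) := by
    refine ⟨x.toNat, ?_⟩
    have h1 : (x.toNat : Int) = x := Int.toNat_of_nonneg (by omega)
    have h2 := Nat.self_le_factorial (x.toNat + 1)
    unfold ifact
    calc x = (x.toNat : Int) := h1.symm
    _ < ((x.toNat + 1 : Nat) : Int) := by push_cast; omega
    _ ≤ _ := by exact_mod_cast h2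
  refine ⟨Nat.find hex, ?_, ?_, Nat.find_spec hex⟩
  · by_contra h
    have h0 : Nat.find hex = 0 := by omega
    have := Nat.find_spec hex
    rw [h0] at this
    have : x < 1 := by simpa [ifact, Nat.factorial] using this
    omega
  · have hpos : 1 ≤ Nat.find hex := by
      by_contra h
      have h0 : Nat.find hex = 0 := by omega
      have := Nat.find_spec hex
      rw [h0] at this
      have : x < 1 := by simpa [ifact, Nat.factorial] using this
      omega
    have hmin := Nat.find_min hex (m := Nat.find hex - 1) (by omega)
    push_neg at hmin
    rwa [Nat.sub_add_cancel hpos] at hmin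

theorem descfacts_eq (n : Nat) :
    ((List.range n).map (fun t => ifact (1 + t))).reverse = descfacts n := by
  induction n with
  | zero => simp [descfacts]
  | succ n ih =>
    rw [List.range_succ]
    simp only [List.map_append, List.map_cons, List.map_nil, List.reverse_append]
    rw [show 1 + n = n + 1 by omega]
    simpa [descfacts] using ih

theorem descfacts_pos (n : Nat) : ∀ f ∈ descfacts n, 0 < f := by
  induction n with
  | zero => simp [descfacts]
  | succ n ih =>
    intro f hf
    rcases List.mem_cons.1 hf with rfl | hf
    · exact ifact_pos _
    · exact ih f hf

theorem to_factorial_spec : Claim_equal_to_factorial := by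
  unfold Claim_equal_to_factorial
  intro x _
  unfold Spec_to_factorial to_factorial to_factorial_alt
  by_cases h0 : x = 0
  · simp [h0]
  rw [if_neg (by simpa using h0), if_neg (by simpa using h0)]
  by_cases hpos : 1 ≤ x
  · -- positive x: the real case
    obtain ⟨n, hn1, hle, hlt⟩ := exists_interval x hpos
    have hx0 : (0:Int) ≤ x := by omega
    -- facts list is the ascending factorial table, its reverse the descending one
    have hfacts : bFacts x 1 1 [] = (List.range n).map (fun t => ifact (1 + t)) := by
      have := bFacts_spec x n hle hlt n 1 [] (by omega) (by omega)
      simpa [ifact, Nat.factorial] using this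
    -- A side as chars
    have hA : (aLoop x 2 []).reverse = ((adig x 2).map mchar).reverse := by
      rw [aLoop_eq]
      congr 1
      rw [List.nil_append]
      have : (adig x 2).map (fun v => (map_number v).toList)
           = (adig x 2).map (fun v => [mchar v]) :=
        List.map_congr_left (fun v hv => map_number_toList v (adig_nonneg x 2 v hv))
      rw [this]
      induction adig x 2 with
      | nil => simp
      | cons a l ihl => simp [ihl]
    -- B side as chars
    have hBpos : ∀ f ∈ (bFacts x 1 1 []).reverse, 0 < f := by
      rw [hfacts, descfacts_eq]; exact descfacts_pos n
    have hB : PySem.Chars.join [] (bLoop x (bFacts x 1 1 []).reverse [])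
            = (bdig x (descfacts n)).map mchar := by
      rw [bLoop_eq _ _ _ hBpos, List.nil_append]
      have hnn := bdig_nonneg (bFacts x 1 1 []).reverse x hx0 hBpos
      rw [hfacts, descfacts_eq] at hnn ⊢
      have : (bdig x (descfacts n)).map (fun v => (map_number v).toList)
           = ((bdig x (descfacts n)).map mchar).map (fun c => [c]) := by
        rw [List.map_map]
        exact List.map_congr_left (fun v hv => map_number_toList v (hnn v hv))
      rw [this, PySem.Chars.join_nil_singletons]
    -- the core digit equality
    have hcore : bdig x (descfacts n) = (adig x 2).reverse := by
      rw [bdig_descfacts n x hx0 hlt]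
      have hpad := adig_pad n x 2 hx0 (by omega) (by rw [gprod_two]; exact hlt)
      rw [adig_len n x hn1 hle hlt] at hpad
      simp only [Nat.sub_self, List.replicate_zero, List.append_nil] at hpad
      rw [← hpad]
    rw [hA, hB, hcore, List.map_reverse]
  · -- negative x: both loops never run, both results are ""
    have hA : aLoop x 2 [] = [] := by rw [aLoop.eq_def, dif_neg (by omega)]
    have hF : bFacts x 1 1 [] = [] := by rw [bFacts.eq_def, dif_neg (by omega)]
    rw [hA, hF]
    simp [bLoop, PySem.Chars.join, List.intercalate]
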